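-- pv_equiv track=rewrite | github.com/beerbank3/coding_test-Python- | coding_test_practice15.py | solution
-- ===== SOURCE A (Python) =====
-- def solution(s):
--     answer = ""
--     big = []
--     small = []
--     for i in s:
--         if i.isupper():
--             big.append(i)
--         else:
--             small.append(i)
--     small.sort()
--     big.sort()
--     small.reverse()
--     big.reverse()
--     for i in small:
--         answer += i
--     for i in big:
--         answer += i
--     return answer
-- ===== SOURCE B (Python) =====
-- def solution(s):
--     # Counting sort over the fixed ASCII alphabet: one counting pass, then one
--     # descending scan of the codes -- no comparison sort.
--     low = {}
--     up = {}
--     for ch in s: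
--         if 'A' <= ch <= 'Z':
--             up[ch] = up.get(ch, 0) + 1
--         else:
--             low[ch] = low.get(ch, 0) + 1
--     out = []
--     for c in range(126, 8, -1):
--         out.append(chr(c) * low.get(chr(c), 0))
--     for c in range(90, 64, -1):
--         out.append(chr(c) * up.get(chr(c), 0))
--     return "".join(out)
-- ===== Notes on version B (the rewrite author's own statement) =====
-- stated objective: faster
-- what changed: Replaces the two comparison sorts (sort ascending then reverse) by a counting sort: one pass tallies each character, then one descending scan over the fixed ASCII code range emits the output.
import Mathlib
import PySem

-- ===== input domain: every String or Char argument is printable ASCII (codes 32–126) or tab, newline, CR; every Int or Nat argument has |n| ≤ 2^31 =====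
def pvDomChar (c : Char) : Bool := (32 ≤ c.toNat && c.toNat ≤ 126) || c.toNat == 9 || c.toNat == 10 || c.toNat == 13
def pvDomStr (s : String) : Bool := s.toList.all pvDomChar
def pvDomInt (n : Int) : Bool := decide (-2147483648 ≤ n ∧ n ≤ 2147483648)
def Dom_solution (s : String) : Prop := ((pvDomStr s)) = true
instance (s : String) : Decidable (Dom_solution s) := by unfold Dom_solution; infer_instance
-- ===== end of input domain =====

-- B replaces A's two comparison sorts by a counting sort over the fixed ASCII alphabet
-- (one counting pass, one descending scan of the codes); exact on the printable-ASCII domain.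

-- ===== PORT A =====
def solution (s : String) : String :=
  let p := s.toList.foldl
      (fun (t : List Char × List Char) i =>
        if PySem.Chars.isupper i then (t.1 ++ [i], t.2) else (t.1, t.2 ++ [i]))
      ([], [])
  let big := p.1
  let small := p.2
  let small := PySem.List.sorted small (fun x => x) false
  let big := PySem.List.sorted big (fun x => x) false
  let small := small.reverse
  let big := big.reverse
  let answer : List Char := small.foldl (fun a i => a ++ [i]) []
  let answer : List Char := big.foldl (fun a i => a ++ [i]) answer
  String.mk answer

-- ===== PORT B =====
def solution_alt (s : String) : String :=
  let t := s.toList.foldl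
      (fun (t : PySem.Dict Char Int × PySem.Dict Char Int) ch =>
        if 'A' ≤ ch ∧ ch ≤ 'Z' then (t.1, t.2.insert ch (t.2.getD ch 0 + 1))
        else (t.1.insert ch (t.1.getD ch 0 + 1), t.2))
      (PySem.Dict.empty, PySem.Dict.empty)
  let out : List (List Char) := (PySem.List.pyRange 126 8 (-1)).map
      (fun c => List.replicate (t.1.getD (Char.ofNat c.toNat) 0).toNat (Char.ofNat c.toNat))
  let out := out ++ (PySem.List.pyRange 90 64 (-1)).map
      (fun c => List.replicate (t.2.getD (Char.ofNat c.toNat) 0).toNat (Char.ofNat c.toNat))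
  String.mk out.flatten

-- ===== PRECONDITION & SPEC =====
def Spec_solution (s : String) (out : String) : Prop := out = solution_alt s
instance (s : String) (out : String) : Decidable (Spec_solution s out) := by unfold Spec_solution; infer_instance

-- ===== CLAIM (what is proved, stated in full; the proofs are below) =====
def Claim_equal_solution : Prop := ∀ (s : String), Dom_solution s → Spec_solution s (solution s)

-- ===== LEMMAS AND PROOFS =====

-- fold 'answer += i'
lemma foldl_snoc (l acc : List Char) : l.foldl (fun a i => a ++ [i]) acc = acc ++ l := by
  induction l generalizing acc with
  | nil => simp
  | cons x xs ih => simp [List.foldl, ih, List.append_assoc]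

-- A's partition loop
lemma partA (l : List Char) (b s : List Char) :
    l.foldl (fun (t : List Char × List Char) i =>
        if PySem.Chars.isupper i then (t.1 ++ [i], t.2) else (t.1, t.2 ++ [i])) (b, s)
    = (b ++ l.filter (fun c => PySem.Chars.isupper c),
       s ++ l.filter (fun c => !PySem.Chars.isupper c)) := by
  induction l generalizing b s with
  | nil => simp
  | cons x xs ih =>
    by_cases h : ('A' ≤ x ∧ x ≤ 'Z')
    · have hu : PySem.Chars.isupper x = true := by
        simp [PySem.Chars.isupper, h.1, h.2]
      simp [List.foldl_cons, hu, ih, List.append_assoc]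
    · have hu : PySem.Chars.isupper x = false := by
        rw [Bool.eq_false_iff]
        intro hb
        exact h (by simpa [PySem.Chars.isupper] using hb)
      simp [List.foldl_cons, hu, ih, List.append_assoc]

-- B's counting loop splits into two independent counter folds
lemma partB (l : List Char) (d1 d2 : PySem.Dict Char Int) :
    l.foldl (fun (t : PySem.Dict Char Int × PySem.Dict Char Int) ch =>
        if 'A' ≤ ch ∧ ch ≤ 'Z' then (t.1, t.2.insert ch (t.2.getD ch 0 + 1))
        else (t.1.insert ch (t.1.getD ch 0 + 1), t.2)) (d1, d2)
    = ((l.filter (fun c => !PySem.Chars.isupper c)).foldl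
          (fun d x => d.insert x (d.getD x 0 + 1)) d1,
       (l.filter (fun c => PySem.Chars.isupper c)).foldl
          (fun d x => d.insert x (d.getD x 0 + 1)) d2) := by
  induction l generalizing d1 d2 with
  | nil => simp
  | cons x xs ih =>
    by_cases h : ('A' ≤ x ∧ x ≤ 'Z')
    · have hu : PySem.Chars.isupper x = true := by
        simp [PySem.Chars.isupper, h.1, h.2]
      simp [List.foldl_cons, if_pos h, hu, ih]
    · have hu : PySem.Chars.isupper x = false := by
        rw [Bool.eq_false_iff]
        intro hb
        exact h (by simpa [PySem.Chars.isupper] using hb)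
      simp [List.foldl_cons, if_neg h, hu, ih]

lemma toNat_ofNat_small (n : Nat) (h : n ≤ 126) : (Char.ofNat n).toNat = n := by
  interval_cases n <;> decide

-- ascending counting-sort blocks
def ascB (l : List Char) (lo n : Nat) : List (List Char) :=
  (List.range n).map (fun k => List.replicate (l.count (Char.ofNat (lo + k))) (Char.ofNat (lo + k)))

lemma count_ascB (l : List Char) (lo n : Nat) (hn : lo + n ≤ 127) (a : Char) :
    (ascB l lo n).flatten.count a
      = if lo ≤ a.toNat ∧ a.toNat < lo + n then l.count a else 0 := by
  induction n with
  | zero => simp [ascB]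
  | succ n ih =>
    have hn' : lo + n ≤ 127 := by omega
    have hstep : (ascB l lo (n + 1)).flatten
        = (ascB l lo n).flatten
          ++ List.replicate (l.count (Char.ofNat (lo + n))) (Char.ofNat (lo + n)) := by
      simp [ascB, List.range_succ]
    rw [hstep, List.count_append, ih hn', List.count_replicate]
    by_cases hx : a.toNat = lo + n
    · have hb : Char.ofNat (lo + n) = a := by rw [← hx, Char.ofNat_toNat]
      have h1 : ¬(lo ≤ a.toNat ∧ a.toNat < lo + n) := by omega
      have h2 : lo ≤ a.toNat ∧ a.toNat < lo + (n + 1) := by omega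
      rw [hb, if_neg h1, if_pos h2]
      simp
    · have hb : ((Char.ofNat (lo + n)) == a) = false := by
        simp only [beq_eq_false_iff_ne, ne_eq]
        intro hc
        exact hx (by rw [← hc, toNat_ofNat_small (lo + n) (by omega)])
      rw [hb]
      simp only [Bool.false_eq_true, if_false, Nat.add_zero]
      split_ifs <;> first | rfl | omega

lemma perm_ascB (l : List Char) (lo n : Nat) (hn : lo + n ≤ 127)
    (h : ∀ c ∈ l, lo ≤ c.toNat ∧ c.toNat < lo + n) :
    (ascB l lo n).flatten.Perm l := by
  rw [List.perm_iff_count]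
  intro a
  rw [count_ascB l lo n hn a]
  split_ifs with hin
  · rfl
  · symm
    rw [List.count_eq_zero]
    intro hmem
    exact hin (h a hmem)

lemma pairwise_ascB (l : List Char) (lo n : Nat) (hn : lo + n ≤ 127) :
    (ascB l lo n).flatten.Pairwise (fun a b : Char => a ≤ b) := by
  rw [List.pairwise_flatten]
  constructor
  · intro bl hbl
    simp only [ascB, List.mem_map] at hbl
    obtain ⟨k, _, rfl⟩ := hbl
    exact List.pairwise_replicate.mpr (Or.inr le_rfl)
  · unfold ascB
    rw [List.pairwise_map]
    apply List.Pairwise.imp_of_mem ?_ List.pairwise_lt_range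
    intro j k hj hk hjk x hx y hy
    rw [List.eq_of_mem_replicate hx, List.eq_of_mem_replicate hy]
    rw [Char.le_def, UInt32.le_iff_toNat_le]
    show (Char.ofNat (lo + j)).toNat ≤ (Char.ofNat (lo + k)).toNat
    rw [toNat_ofNat_small _ (by simp at hj; omega), toNat_ofNat_small _ (by simp at hk; omega)]
    simp at hk
    omega

lemma sorted_eq_ascB (l : List Char) (lo n : Nat) (hn : lo + n ≤ 127)
    (h : ∀ c ∈ l, lo ≤ c.toNat ∧ c.toNat < lo + n) :
    PySem.List.sorted l (fun x => x) false = (ascB l lo n).flatten := by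
  apply PySem.List.eq_of_perm_of_pairwise_le_of_injective (fun x : Char => x) Function.injective_id
  · exact (PySem.List.sorted_perm l (fun x => x) false).trans (perm_ascB l lo n hn h).symm
  · exact PySem.List.sorted_pairwise l (fun x => x)
  · exact pairwise_ascB l lo n hn

-- reversing the ascending blocks gives the descending scan
lemma reverse_ascB (l : List Char) (lo n : Nat) :
    (ascB l lo n).flatten.reverse
      = ((List.range n).map (fun k =>
          List.replicate (l.count (Char.ofNat (lo + n - 1 - k))) (Char.ofNat (lo + n - 1 - k)))).flatten := by
  have hrev : (List.range n).reverse = List.map (fun x => n - 1 - x) (List.range n) := by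
    apply List.ext_getElem
    · simp
    · intro i h1 h2
      simp [List.getElem_reverse]
  rw [List.reverse_flatten]
  unfold ascB
  rw [List.map_map, ← List.map_reverse, hrev, List.map_map]
  apply congrArg List.flatten
  apply List.map_congr_left
  intro k hk
  have hk' : k < n := List.mem_range.mp hk
  simp only [Function.comp, List.reverse_replicate]
  have harg : lo + (n - 1 - k) = lo + n - 1 - k := by omega
  rw [harg]

-- sorted-then-reversed equals the descending counting-sort scan
lemma sorted_reverse_eq (l : List Char) (lo n : Nat) (hn : lo + n ≤ 127)
    (h : ∀ c ∈ l, lo ≤ c.toNat ∧ c.toNat < lo + n) :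
    (PySem.List.sorted l (fun x => x) false).reverse
      = ((List.range n).map (fun k =>
          List.replicate (l.count (Char.ofNat (lo + n - 1 - k))) (Char.ofNat (lo + n - 1 - k)))).flatten := by
  rw [sorted_eq_ascB l lo n hn h, reverse_ascB]

lemma getD_count (l : List Char) (v : Char) :
    ((l.foldl (fun d x => d.insert x (d.getD x 0 + 1)) (PySem.Dict.empty : PySem.Dict Char Int)).getD v 0).toNat
      = l.count v := by
  rw [PySem.Dict.getD_foldl_insert_add_one, PySem.Dict.getD_empty]
  omega

-- B's descending scan over pyRange hi lo (-1), rewritten as a range map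
lemma pyRange_scan (d : PySem.Dict Char Int) (hi : Int) (n : Nat)
    (hn : (n : Int) ≤ hi + 1) :
    (PySem.List.pyRange hi (hi - n) (-1)).map
        (fun c => List.replicate (d.getD (Char.ofNat c.toNat) 0).toNat (Char.ofNat c.toNat))
      = (List.range n).map (fun k =>
          List.replicate (d.getD (Char.ofNat (hi.toNat - k)) 0).toNat (Char.ofNat (hi.toNat - k))) := by
  rw [PySem.List.pyRange_neg_one]
  have : (hi - (hi - n)).toNat = n := by omega
  rw [this, List.map_map]
  apply List.map_congr_left
  intro k hk
  simp only [Function.comp]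
  have hk' : k < n := List.mem_range.mp hk
  have : (hi - (k : Int)).toNat = hi.toNat - k := by omega
  rw [this]

-- ===== VERDICT (by name: the statement is the Claim_ definition above) =====
theorem solution_spec : Claim_equal_solution := by
  intro s hdom
  unfold Spec_solution solution solution_alt
  simp only []
  rw [partA, partB]
  have h8 : ((8 : Int)) = (126 : Int) - (118 : Nat) := by norm_num
  have h64 : ((64 : Int)) = (90 : Int) - (26 : Nat) := by norm_num
  rw [h8, h64, pyRange_scan _ _ _ (by norm_num), pyRange_scan _ _ _ (by norm_num)]
  simp only [getD_count]
  have hdom' : ∀ c ∈ s.toList, 9 ≤ c.toNat ∧ c.toNat < 127 := by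
    intro c hc
    have := List.all_eq_true.mp hdom c hc
    simp [pvDomChar] at this
    omega
  have hsmall : ∀ c ∈ s.toList.filter (fun c => !PySem.Chars.isupper c), 9 ≤ c.toNat ∧ c.toNat < 9 + 118 := by
    intro c hc
    have := hdom' c (List.mem_of_mem_filter hc)
    omega
  have hbig : ∀ c ∈ s.toList.filter (fun c => PySem.Chars.isupper c), 65 ≤ c.toNat ∧ c.toNat < 65 + 26 := by
    intro c hc
    have h1 := List.of_mem_filter hc
    simp only [PySem.Chars.isupper, Bool.and_eq_true, decide_eq_true_eq] at h1
    have ha := UInt32.le_iff_toNat_le.mp (Char.le_def.mp h1.1)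
    have hb := UInt32.le_iff_toNat_le.mp (Char.le_def.mp h1.2)
    have hA : ('A').val.toNat = 65 := by decide
    have hZ : ('Z').val.toNat = 90 := by decide
    rw [hA] at ha
    rw [hZ] at hb
    have hcc : c.toNat = c.val.toNat := rfl
    constructor <;> omega
  rw [foldl_snoc, foldl_snoc]
  simp only [List.nil_append]
  rw [sorted_reverse_eq _ 9 118 (by norm_num) hsmall,
    sorted_reverse_eq _ 65 26 (by norm_num) hbig]
  rw [List.flatten_append]
  congr 2
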